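-- pv_equiv track=rewrite | github.com/thudsonbu/dip | 9.2020/knight_move_probability.py | get_valid_moves
-- ===== SOURCE A (Python) =====
-- def get_valid_moves(x,y,k):
--     valid_moves = check_valid_moves(x,y)
--     if k > 1:
--         sub_moves = []
--         for move in valid_moves:
--             sub_moves += get_valid_moves(move[0],move[1],k-1)
--         return valid_moves + sub_moves
--     return valid_moves
--
-- def check_valid_moves(x,y):
--     moves = [[-1,2],[1,2],[2,1],[2,-1],[1,-2],[-1,-2],[-2,-1],[-2,1]]
--     valid_moves = []
--     for move in moves:
--         if x + move[0] in range(0,8) and y + move[1] in range(0,8):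
--             new_cor = [x + move[0], y + move[1]]
--             valid_moves.append(new_cor)
--     return valid_moves
-- ===== SOURCE B (Python) =====
-- def check_valid_moves(x, y):
--     deltas = [(-1, 2), (1, 2), (2, 1), (2, -1), (1, -2), (-1, -2), (-2, -1), (-2, 1)]
--     return [[x + dx, y + dy] for dx, dy in deltas if 0 <= x + dx < 8 and 0 <= y + dy < 8]
--
-- def get_valid_moves(x, y, k):
--     result = []
--     stack = [(x, y, k)]
--     while stack:
--         cx, cy, ck = stack.pop()
--         vm = check_valid_moves(cx, cy)
--         result.extend(vm)
--         if ck > 1: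
--             for m in reversed(vm):
--                 stack.append((m[0], m[1], ck - 1))
--     return result
-- ===== Notes on version B (the rewrite author's own statement) =====
-- stated objective: alternative
-- what changed: The recursion over k is replaced by an iterative while-loop over an explicit LIFO stack of (x, y, k) frames (children pushed in reversed order so they pop left-to-right), and check_valid_moves is rewritten as a comprehension over delta pairs.
import Mathlib
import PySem

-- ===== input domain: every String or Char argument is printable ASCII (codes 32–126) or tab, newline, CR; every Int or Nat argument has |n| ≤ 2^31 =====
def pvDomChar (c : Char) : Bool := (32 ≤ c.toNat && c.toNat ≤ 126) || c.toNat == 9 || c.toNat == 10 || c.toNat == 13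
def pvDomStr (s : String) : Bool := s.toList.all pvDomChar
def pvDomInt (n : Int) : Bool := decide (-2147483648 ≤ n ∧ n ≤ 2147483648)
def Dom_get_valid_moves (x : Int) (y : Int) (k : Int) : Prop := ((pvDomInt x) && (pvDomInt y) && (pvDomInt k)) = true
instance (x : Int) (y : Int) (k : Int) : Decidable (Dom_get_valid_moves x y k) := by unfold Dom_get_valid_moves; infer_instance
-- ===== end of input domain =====

-- B replaces A's recursion by an explicit LIFO-stack loop (children pushed in reversed
-- order) and writes check_valid_moves as a comprehension; objective: alternative.

-- ===== PORT A =====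
-- literal port of check_valid_moves: loop over the 8 move lists, append the valid coordinates
def check_valid_moves (x : Int) (y : Int) : List (List Int) :=
  let moves : List (List Int) := [[-1,2],[1,2],[2,1],[2,-1],[1,-2],[-1,-2],[-2,-1],[-2,1]]
  moves.foldl (fun acc move =>
    let nx := x + move.getD 0 0   -- move[0] on a literal 2-element list, always in range
    let ny := y + move.getD 1 0
    if (0 ≤ nx ∧ nx < 8) ∧ (0 ≤ ny ∧ ny < 8) then acc ++ [[nx, ny]] else acc) []

-- A's recursion on k, with fuel (k-1).toNat: fuel 0 ↔ k ≤ 1 (return valid_moves),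
-- fuel n+1 ↔ k > 1 (valid_moves ++ the foldl-accumulated recursive sub_moves at k-1).
def gvmAux : Nat → Int → Int → List (List Int)
  | 0, x, y => check_valid_moves x y
  | n+1, x, y =>
      let valid_moves := check_valid_moves x y
      let sub_moves := valid_moves.foldl
        (fun acc move => acc ++ gvmAux n (move.getD 0 0) (move.getD 1 0)) []
      valid_moves ++ sub_moves

def get_valid_moves (x : Int) (y : Int) (k : Int) : List (List Int) :=
  gvmAux (k - 1).toNat x y

-- ===== PORT B =====
-- B's check_valid_moves: comprehension over the delta pairs
def check_valid_moves_b (x : Int) (y : Int) : List (List Int) :=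
  let deltas : List (Int × Int) := [(-1,2),(1,2),(2,1),(2,-1),(1,-2),(-1,-2),(-2,-1),(-2,1)]
  deltas.filterMap (fun d =>
    if (0 ≤ x + d.1 ∧ x + d.1 < 8) ∧ (0 ≤ y + d.2 ∧ y + d.2 < 8)
    then some [x + d.1, y + d.2] else none)

-- B's while-loop over the stack (head = top of stack). Python pushes reversed(vm) one by
-- one onto the top, which leaves the children on top in vm's original order: as a
-- head-is-top list that is exactly (vm.map child) ++ rest. The extra Nat argument is
-- fuel making the loop total (9^(k-1).toNat + 1 bounds the iteration count; loopB_eq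
-- below is proved for any sufficient fuel); it only guards termination.
def loopB : Nat → List (Int × Int × Int) → List (List Int) → List (List Int)
  | 0, _, result => result
  | _ + 1, [], result => result
  | fuel + 1, (cx, cy, ck) :: rest, result =>
      let vm := check_valid_moves_b cx cy
      let newStack :=
        if ck > 1 then (vm.map (fun m => (m.getD 0 0, m.getD 1 0, ck - 1))) ++ rest
        else rest
      loopB fuel newStack (result ++ vm)

def get_valid_moves_alt (x : Int) (y : Int) (k : Int) : List (List Int) :=
  loopB (9 ^ (k - 1).toNat + 1) [(x, y, k)] []

-- ===== PRECONDITION & SPEC =====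
def Spec_get_valid_moves (x : Int) (y : Int) (k : Int) (out : List (List Int)) : Prop := out = get_valid_moves_alt x y k
instance (x : Int) (y : Int) (k : Int) (out : List (List Int)) : Decidable (Spec_get_valid_moves x y k out) := by unfold Spec_get_valid_moves; infer_instance

-- ===== CLAIM (what is proved, stated in full; the proofs are below) =====
def Claim_equal_get_valid_moves : Prop := ∀ (x : Int) (y : Int) (k : Int), Dom_get_valid_moves x y k → Spec_get_valid_moves x y k (get_valid_moves x y k)

-- ===== LEMMAS AND PROOFS =====

-- at most the 8 deltas survive the filter (used by the fuel-sufficiency argument)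
theorem cvmb_len (x y : Int) : (check_valid_moves_b x y).length ≤ 8 := by
  unfold check_valid_moves_b
  exact (List.length_filterMap_le _ _).trans (by simp)


-- A's append-if loop written as a filterMap (the shape of B's comprehension)
theorem push_loop (x y : Int) (l : List (List Int)) (acc : List (List Int)) :
    l.foldl (fun acc move =>
      let nx := x + move.getD 0 0
      let ny := y + move.getD 1 0
      if (0 ≤ nx ∧ nx < 8) ∧ (0 ≤ ny ∧ ny < 8) then acc ++ [[nx, ny]] else acc) acc
    = acc ++ l.filterMap (fun move =>
      let nx := x + move.getD 0 0
      let ny := y + move.getD 1 0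
      if (0 ≤ nx ∧ nx < 8) ∧ (0 ≤ ny ∧ ny < 8) then some [nx, ny] else none) := by
  induction l generalizing acc with
  | nil => simp
  | cons m t ih =>
      simp only [List.foldl_cons, List.filterMap_cons]
      split
      · rw [ih]; simp
      · rw [ih]

theorem cvm_eq (x y : Int) : check_valid_moves x y = check_valid_moves_b x y := by
  unfold check_valid_moves check_valid_moves_b
  rw [push_loop]
  rfl

theorem gvmAux_succ (n : Nat) (x y : Int) :
    gvmAux (n+1) x y = check_valid_moves x y ++ (check_valid_moves x y).flatMap
      (fun m => gvmAux n (m.getD 0 0) (m.getD 1 0)) := by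
  conv_lhs => rw [gvmAux]
  rw [PySem.List.foldl_append_eq_flatMap]
  simp

-- iteration measure of a stack frame
def frameW (t : Int × Int × Int) : Nat := 9 ^ (t.2.2 - 1).toNat

-- the loop invariant: with enough fuel, loopB emits, for each stack frame,
-- exactly A's recursive output
theorem loopB_eq (fuel : Nat) (stack : List (Int × Int × Int)) (result : List (List Int))
    (hf : (stack.map frameW).sum < fuel) :
    loopB fuel stack result
      = result ++ (stack.map (fun t => get_valid_moves t.1 t.2.1 t.2.2)).flatten := by
  induction fuel generalizing stack result with
  | zero => omega
  | succ f ih =>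
      match stack with
      | [] => simp [loopB]
      | (cx, cy, ck) :: rest =>
        show loopB (f + 1) ((cx, cy, ck) :: rest) result = _
        rw [loopB]
        simp only [List.map_cons, List.sum_cons, frameW] at hf
        by_cases hck : ck > 1
        · rw [if_pos hck]
          have hpow : (ck - 1).toNat = (ck - 1 - 1).toNat + 1 := by omega
          have hsum : ((((check_valid_moves_b cx cy).map
                (fun m => (m.getD 0 0, m.getD 1 0, ck - 1))) ++ rest).map frameW).sum
              = (check_valid_moves_b cx cy).length * 9 ^ (ck - 1 - 1).toNat
                + (rest.map frameW).sum := by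
            rw [List.map_append, List.sum_append, List.map_map]
            rw [show (frameW ∘ (fun m : List Int => (m.getD 0 0, m.getD 1 0, ck - 1)))
                = (fun _ : List Int => 9 ^ (ck - 1 - 1).toNat) from funext fun _ => rfl]
            rw [List.map_const', List.sum_replicate, smul_eq_mul]
          have hlen := cvmb_len cx cy
          have h9 : 0 < 9 ^ (ck - 1 - 1).toNat := Nat.pow_pos (by omega)
          have hlt : ((((check_valid_moves_b cx cy).map
                (fun m => (m.getD 0 0, m.getD 1 0, ck - 1))) ++ rest).map frameW).sum < f := by
            rw [hsum]
            rw [hpow, pow_succ] at hf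
            nlinarith [h9, hlen]
          rw [ih _ _ hlt]
          have hsem : get_valid_moves cx cy ck
              = check_valid_moves_b cx cy ++ (check_valid_moves_b cx cy).flatMap
                  (fun m => get_valid_moves (m.getD 0 0) (m.getD 1 0) (ck - 1)) := by
            unfold get_valid_moves
            rw [hpow, gvmAux_succ, cvm_eq]
          simp only [List.map_cons, List.flatten_cons]
          rw [hsem]
          simp [List.flatMap_def, List.map_map, Function.comp_def, List.append_assoc]
        · rw [if_neg hck]
          have h9 : 0 < 9 ^ (ck - 1).toNat := Nat.pow_pos (by omega)
          have hlt : ((rest.map frameW)).sum < f := by omega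
          rw [ih _ _ hlt]
          have hsem0 : get_valid_moves cx cy ck = check_valid_moves_b cx cy := by
            unfold get_valid_moves
            rw [show (ck - 1).toNat = 0 from by omega]
            show gvmAux 0 cx cy = _
            rw [gvmAux]
            exact cvm_eq cx cy
          simp only [List.map_cons, List.flatten_cons]
          rw [hsem0]
          simp

-- ===== VERDICT (by name: the statement is the Claim_ definition above) =====
theorem get_valid_moves_spec : Claim_equal_get_valid_moves := by
  intro x y k _
  show get_valid_moves x y k = get_valid_moves_alt x y k
  unfold get_valid_moves_alt
  rw [loopB_eq _ _ _ (by simp [frameW])]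
  simp
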